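-- pv_equiv track=rewrite | github.com/JoeKoss/Connect4 | connect4.py | checkForLeftHorizontal
-- ===== SOURCE A (Python) =====
-- def checkForLeftHorizontal(row, col, n, symbol, tBoard):
-- 	if col - 1 >= 0:
-- 		if tBoard[row][col-1] != symbol:
-- 			return n
-- 		else:
-- 			return 5 + checkForLeftHorizontal(row, col - 1, n, symbol, tBoard)
-- 	else:
-- 		return n
-- ===== SOURCE B (Python) =====
-- def checkForLeftHorizontal(row, col, n, symbol, tBoard):
--     c = col - 1
--     while c >= 0 and tBoard[row][c] == symbol:
--         n += 5
--         c -= 1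
--     return n
-- ===== Notes on version B (the rewrite author's own statement) =====
-- stated objective: simpler
-- what changed: Replaces the tail recursion (which builds the result as 5 + 5 + ... + n on the way back up) with a plain while loop that walks a cursor leftward and accumulates n += 5 in place.
import Mathlib
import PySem

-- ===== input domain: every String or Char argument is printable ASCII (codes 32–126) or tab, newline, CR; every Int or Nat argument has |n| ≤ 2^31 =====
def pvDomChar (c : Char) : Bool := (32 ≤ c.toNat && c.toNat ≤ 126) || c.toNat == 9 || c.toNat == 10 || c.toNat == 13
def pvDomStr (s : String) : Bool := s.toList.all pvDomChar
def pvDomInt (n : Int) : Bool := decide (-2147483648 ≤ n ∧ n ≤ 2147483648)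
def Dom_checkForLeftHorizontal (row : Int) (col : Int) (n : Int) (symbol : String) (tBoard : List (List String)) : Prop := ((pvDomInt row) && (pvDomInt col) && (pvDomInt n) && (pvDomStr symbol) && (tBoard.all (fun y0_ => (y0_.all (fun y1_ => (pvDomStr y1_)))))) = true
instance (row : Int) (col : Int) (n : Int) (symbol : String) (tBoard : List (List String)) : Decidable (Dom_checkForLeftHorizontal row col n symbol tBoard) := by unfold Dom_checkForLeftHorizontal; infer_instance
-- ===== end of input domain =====

-- B replaces A's tail recursion by an iterative leftward cursor accumulating n += 5 (simpler; same cost).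

-- ===== PORT A =====
-- Literal port of A's recursion; tBoard[row][col-1] via pyGet? (none where Python raises, excluded by Pre_).
def checkForLeftHorizontal (row : Int) (col : Int) (n : Int) (symbol : String) (tBoard : List (List String)) : Int :=
  if col - 1 ≥ 0 then
    if ((PySem.List.pyGet? tBoard row).bind (fun r => PySem.List.pyGet? r (col - 1))) ≠ some symbol then
      n
    else
      5 + checkForLeftHorizontal row (col - 1) n symbol tBoard
  else
    n
termination_by col.toNat
decreasing_by
  have h : col - 1 ≥ 0 := by assumption
  omega

-- ===== PORT B =====
-- B's while loop: cursor c counts down from col-1 while the cell matches, adding 5 to n each step.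
def pvAltGo (r : List String) (symbol : String) : Nat → Int → Int
  | c, n =>
    if PySem.List.pyGet? r (c : Int) = some symbol then
      if c = 0 then n + 5 else pvAltGo r symbol (c - 1) (n + 5)
    else n

def checkForLeftHorizontal_alt (row : Int) (col : Int) (n : Int) (symbol : String) (tBoard : List (List String)) : Int :=
  if col - 1 < 0 then n
  else
    match PySem.List.pyGet? tBoard row with
    | none => n   -- B raises here (IndexError), excluded by Pre_
    | some r => pvAltGo r symbol (col - 1).toNat n

-- ===== PRECONDITION & SPEC =====
-- Pre_ excludes exactly the inputs where both Pythons raise IndexError: col ≥ 1 with an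
-- invalid row index or with col-1 beyond the end of the row.
def Pre_checkForLeftHorizontal (row : Int) (col : Int) (n : Int) (symbol : String) (tBoard : List (List String)) : Prop :=
  col ≤ 0 ∨ col ≤ ((PySem.List.pyGet? tBoard row).elim (-1) (fun r => (r.length : Int)))
instance (row : Int) (col : Int) (n : Int) (symbol : String) (tBoard : List (List String)) : Decidable (Pre_checkForLeftHorizontal row col n symbol tBoard) := by unfold Pre_checkForLeftHorizontal; infer_instance

def pvWitness_checkForLeftHorizontal : Int × Int × Int × String × List (List String) :=
  (0, 2, 0, "X", [["X", "O", "X"], ["O", "X", "O"]])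

def Spec_checkForLeftHorizontal (row : Int) (col : Int) (n : Int) (symbol : String) (tBoard : List (List String)) (out : Int) : Prop := out = checkForLeftHorizontal_alt row col n symbol tBoard
instance (row : Int) (col : Int) (n : Int) (symbol : String) (tBoard : List (List String)) (out : Int) : Decidable (Spec_checkForLeftHorizontal row col n symbol tBoard out) := by unfold Spec_checkForLeftHorizontal; infer_instance

-- ===== CLAIM (what is proved, stated in full; the proofs are below) =====
def Claim_equal_checkForLeftHorizontal : Prop := ∀ (row : Int) (col : Int) (n : Int) (symbol : String) (tBoard : List (List String)), Dom_checkForLeftHorizontal row col n symbol tBoard → Pre_checkForLeftHorizontal row col n symbol tBoard → Spec_checkForLeftHorizontal row col n symbol tBoard (checkForLeftHorizontal row col n symbol tBoard)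

-- ===== LEMMAS AND PROOFS =====

-- Accumulating into n commutes with the loop: starting the loop with n+5 adds 5 to its result.
theorem pvAltGo_shift (r : List String) (symbol : String) :
    ∀ (c : Nat) (n : Int), pvAltGo r symbol c (n + 5) = 5 + pvAltGo r symbol c n := by
  intro c
  induction c with
  | zero =>
    intro n
    conv_lhs => rw [pvAltGo]
    conv_rhs => rw [pvAltGo]
    split_ifs with h1 h2
    · ring
    · exact absurd rfl h2
    · ring
  | succ m ih =>
    intro n
    conv_lhs => rw [pvAltGo]
    conv_rhs => rw [pvAltGo]
    split_ifs with h h2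
    · exact h2.elim
    · simpa using ih (n + 5)
    · ring

-- With a valid row r, A called at column k+1 computes exactly B's loop started at cursor k.
theorem pvA_eq_altGo (row : Int) (symbol : String) (tBoard : List (List String))
    (r : List String) (hr : PySem.List.pyGet? tBoard row = some r) :
    ∀ (k : Nat) (n : Int),
      checkForLeftHorizontal row ((k : Int) + 1) n symbol tBoard = pvAltGo r symbol k n := by
  intro k
  induction k with
  | zero =>
    intro n
    conv_lhs => rw [checkForLeftHorizontal]
    conv_rhs => rw [pvAltGo]
    rw [if_pos (by omega : ((0:Nat):Int) + 1 - 1 ≥ 0)]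
    simp only [hr, Option.bind_some]
    push_cast
    by_cases h : PySem.List.pyGet? r (0:Int) = some symbol
    · rw [if_neg (by simp [h]), if_pos h]
      rw [checkForLeftHorizontal, if_neg (by omega : ¬ ((0:Int) - 1 ≥ 0))]
      omega
    · rw [if_pos h, if_neg h]
  | succ m ih =>
    intro n
    conv_lhs => rw [checkForLeftHorizontal]
    conv_rhs => rw [pvAltGo]
    rw [if_pos (by push_cast; omega : (((m+1:Nat)):Int) + 1 - 1 ≥ 0)]
    simp only [hr, Option.bind_some]
    push_cast
    rw [show ((m:Int)) + 1 + 1 - 1 = (m:Int) + 1 from by ring]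
    by_cases h : PySem.List.pyGet? r ((m:Int) + 1) = some symbol
    · rw [if_neg (by simp [h]), if_pos h]
      rw [ih n]
      exact (pvAltGo_shift r symbol m n).symm
    · rw [if_pos h, if_neg h]

-- ===== VERDICT (by name: the statement is the Claim_ definition above) =====
theorem checkForLeftHorizontal_spec : Claim_equal_checkForLeftHorizontal := by
  intro row col n symbol tBoard _ hpre
  unfold Spec_checkForLeftHorizontal
  by_cases hc : col - 1 < 0
  · rw [checkForLeftHorizontal, if_neg (by omega : ¬ (col - 1 ≥ 0)),
      checkForLeftHorizontal_alt, if_pos hc]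
  · cases hg : PySem.List.pyGet? tBoard row with
    | none =>
      exfalso
      rcases hpre with h | h
      · omega
      · rw [hg] at h; simp [Option.elim] at h; omega
    | some r =>
      rw [checkForLeftHorizontal_alt, if_neg hc, hg]
      show checkForLeftHorizontal row col n symbol tBoard = pvAltGo r symbol (col - 1).toNat n
      set k := (col - 1).toNat with hk
      rw [show col = (k:Int) + 1 from by omega]
      exact pvA_eq_altGo row symbol tBoard r hg k n
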